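-- pv_equiv track=rewrite | github.com/HACO8888/NTUCampJudge | 6.py | check_yee
-- ===== SOURCE A (Python) =====
-- def check_yee(s):
--     final = 0
--     j = 1
--
--     for i in range(len(s)):
--         if s[i] == "y":
--             final += abs((i+1) - j)
--             j += 3
--
--     return final
-- ===== SOURCE B (Python) =====
-- def check_yee(s):
--     # Jump between 'y' occurrences with str.find instead of scanning every
--     # character: each iteration locates the next 'y', adds its distance to the
--     # k-th target slot 1+3k (|pos - 3k| in 0-based terms), and discards the
--     # consumed prefix.
--     total = 0
--     off = 0
--     k = 0
--     t = s
--     while True: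
--         idx = t.find("y")
--         if idx == -1:
--             return total
--         total += abs((off + idx) - 3 * k)
--         t = t[idx + 1:]
--         off += idx + 1
--         k += 1
-- ===== Notes on version B (the rewrite author's own statement) =====
-- stated objective: faster
-- what changed: Instead of A's per-character index loop threading a stepping counter j, B repeatedly jumps to the next occurrence with str.find and slices off the consumed prefix, summing |pos - 3k| per occurrence; non-matching characters are scanned by the C-level find, not by Python bytecode.
import Mathlib
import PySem

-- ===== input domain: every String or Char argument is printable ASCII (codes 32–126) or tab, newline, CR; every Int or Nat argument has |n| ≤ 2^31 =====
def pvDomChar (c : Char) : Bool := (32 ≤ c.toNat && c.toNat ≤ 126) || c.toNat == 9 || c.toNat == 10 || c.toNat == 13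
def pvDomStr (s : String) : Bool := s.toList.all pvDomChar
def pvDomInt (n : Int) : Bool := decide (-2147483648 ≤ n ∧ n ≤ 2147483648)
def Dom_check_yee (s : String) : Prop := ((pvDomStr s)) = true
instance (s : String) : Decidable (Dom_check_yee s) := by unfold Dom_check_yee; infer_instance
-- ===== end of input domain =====

-- B replaces A's per-character loop with a stepping counter by find-and-slice jumps between the
-- 'y' occurrences (objective: measured-faster constant factor — C-level find vs per-char bytecode; same return value, no mutation).

-- ===== PORT A =====
-- literal port of A: for i in range(len(s)): if s[i] == "y": final += abs((i+1)-j); j += 3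
def check_yee (s : String) : Int :=
  let st := (PySem.List.pyRange 0 (s.toList.length) 1).foldl
    (fun (st : Int × Int) i =>
      match PySem.List.pyGet? s.toList i with
      | some c => if c == 'y' then (st.1 + |(i + 1) - st.2|, st.2 + 3) else st
      | none => st) (0, 1)
  st.1

-- ===== PORT B =====
-- termination fact for goB: a successful find lies strictly below the length
theorem goB_find_lt (t : List Char) (h : PySem.Chars.find t ['y'] ≠ -1) :
    (t.drop (PySem.Chars.find t ['y'] + 1).toNat).length < t.length := by
  have h0 : 0 ≤ PySem.Chars.find t ['y'] := by
    have := PySem.Chars.neg_one_le_find (s := t) (sub := ['y']); omega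
  have hpre := (PySem.Chars.find_spec (s := t) (sub := ['y']) h0).1
  have hlt : (PySem.Chars.find t ['y']).toNat < t.length := by
    by_contra hge
    have : t.drop (PySem.Chars.find t ['y']).toNat = [] := List.drop_eq_nil_of_le (by omega)
    rw [this] at hpre
    exact absurd (List.prefix_nil.mp hpre) (by simp)
  simp only [List.length_drop]
  omega

-- literal port of B's while loop: idx = t.find("y"); if idx == -1: return total;
-- total += abs((off+idx) - 3*k); t = t[idx+1:]; off += idx+1; k += 1
def goB (t : List Char) (off k total : Int) : Int :=
  let idx := PySem.Chars.find t ['y']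
  if h : idx = -1 then total
  else goB (PySem.List.slice t (some (idx + 1)) none) (off + idx + 1) (k + 1)
           (total + |(off + idx) - 3 * k|)
termination_by t.length
decreasing_by
  rw [PySem.List.slice_from t (by
    have := PySem.Chars.neg_one_le_find (s := t) (sub := ['y']); omega)]
  exact goB_find_lt t h

def check_yee_alt (s : String) : Int := goB s.toList 0 0 0

-- ===== PRECONDITION & SPEC =====
def Spec_check_yee (s : String) (out : Int) : Prop := out = check_yee_alt s
instance (s : String) (out : Int) : Decidable (Spec_check_yee s out) := by unfold Spec_check_yee; infer_instance

-- ===== CLAIM (what is proved, stated in full; the proofs are below) =====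
def Claim_equal_check_yee : Prop := ∀ (s : String), Dom_check_yee s → Spec_check_yee s (check_yee s)

-- ===== LEMMAS AND PROOFS =====

-- A's indexed loop over range(len) with s[i] is the fold over enumerate of the char list.
theorem loopA_enum (F : (Int × Int) → Int → Char → (Int × Int)) :
    ∀ (xs pre : List Char) (st : Int × Int),
      (PySem.List.pyRange (pre.length) (pre.length + xs.length) 1).foldl
        (fun st i =>
          match PySem.List.pyGet? (pre ++ xs) i with
          | some c => F st i c
          | none => st) st
      = (PySem.List.enumerate xs pre.length).foldl (fun st p => F st p.1 p.2) st := by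
  intro xs
  induction xs with
  | nil =>
    intro pre st
    simp [PySem.List.pyRange_one_eq_nil, PySem.List.enumerate_nil]
  | cons x xs ih =>
    intro pre st
    rw [PySem.List.pyRange_one_cons (by simp only [List.length_cons]; push_cast; omega)]
    simp only [List.foldl_cons, PySem.List.pyGet?_append_length]
    have hlist : pre ++ x :: xs = (pre ++ [x]) ++ xs := by simp
    have hlen : (pre.length : Int) + 1 = ((pre ++ [x]).length : Int) := by simp
    have hlen2 : (pre.length : Int) + (x :: xs).length
        = ((pre ++ [x]).length : Int) + xs.length := by simp; omega
    rw [hlist, hlen, hlen2, ih (pre ++ [x]) (F st (pre.length) x)]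
    rw [PySem.List.enumerate_cons]
    simp only [List.foldl_cons]
    congr 1
    simp

-- abbreviation for A's loop step on the enumerate fold
def stepA (st : Int × Int) (p : Int × Char) : Int × Int :=
  if p.2 == 'y' then (st.1 + |(p.1 + 1) - st.2|, st.2 + 3) else st

-- the first component of A's fold is additive in its starting value
theorem foldA_addFst :
    ∀ (ps : List (Int × Char)) (f j : Int),
      (ps.foldl stepA (f, j)).1 = f + (ps.foldl stepA (0, j)).1 := by
  intro ps
  induction ps with
  | nil => intro f j; simp
  | cons p ps ih =>
    intro f j
    by_cases hp : p.2 = 'y'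
    · simp only [List.foldl_cons, stepA, hp, BEq.rfl, if_pos]
      rw [ih (f + |p.1 + 1 - j|) (j + 3), ih (0 + |p.1 + 1 - j|) (j + 3)]
      ring
    · simp only [List.foldl_cons, stepA, show (p.2 == 'y') = false by simp [hp],
        Bool.false_eq_true, if_neg, not_false_iff]
      exact ih f j

-- A's fold is the identity on a stretch with no 'y'
theorem foldA_noY :
    ∀ (xs : List Char), 'y' ∉ xs → ∀ (off : Int) (st : Int × Int),
      (PySem.List.enumerate xs off).foldl stepA st = st := by
  intro xs
  induction xs with
  | nil => intro _ off st; simp [PySem.List.enumerate_nil]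
  | cons x xs ih =>
    intro hmem off st
    simp only [List.mem_cons, not_or] at hmem
    rw [PySem.List.enumerate_cons]
    simp only [List.foldl_cons, stepA]
    rw [if_neg (by simp; exact fun hx => hmem.1 hx.symm)]
    exact ih hmem.2 (off + 1) st

-- main invariant: B's find-and-slice loop computes A's fold (with j = 1 + 3k), one jump at a time
theorem goB_eq_foldA :
    ∀ (n : Nat) (t : List Char), t.length ≤ n → ∀ (off k total : Int),
      goB t off k total
        = total + ((PySem.List.enumerate t off).foldl stepA (0, 1 + 3 * k)).1 := by
  intro n
  induction n with
  | zero =>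
    intro t hn off k total
    have : t = [] := List.eq_nil_of_length_eq_zero (by omega)
    subst this
    rw [goB]
    have hf : PySem.Chars.find [] ['y'] = -1 :=
      (PySem.Chars.find_eq_neg_one_iff _ _).mpr (by simp)
    simp [hf, PySem.List.enumerate_nil]
  | succ n ih =>
    intro t hn off k total
    rw [goB]
    by_cases h : PySem.Chars.find t ['y'] = -1
    · simp only [h, dif_pos]
      have hnmem : 'y' ∉ t := by
        intro hmem
        exact (PySem.Chars.find_eq_neg_one_iff _ _).mp h
          ((List.singleton_infix_iff 'y' t).mpr hmem)
      rw [foldA_noY t hnmem off (0, 1 + 3 * k)]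
      simp
    · simp only [h, dif_neg, not_false_iff]
      have h0 : 0 ≤ PySem.Chars.find t ['y'] := by
        have := PySem.Chars.neg_one_le_find (s := t) (sub := ['y']); omega
      set idx := PySem.Chars.find t ['y'] with hidx
      set p : Nat := idx.toNat with hp
      have hcast : (p : Int) = idx := Int.toNat_of_nonneg h0
      have hspec := PySem.Chars.find_spec (s := t) (sub := ['y']) h0
      have hlt : p < t.length := by
        by_contra hge
        have hdrop : t.drop p = [] := List.drop_eq_nil_of_le (by omega)
        rw [hdrop] at hspec
        exact absurd (List.prefix_nil.mp hspec.1) (by simp)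
      -- decompose t around the found 'y'
      have hgetp : t[p] = 'y' := by
        have hpre := hspec.1
        have : (t.drop p)[0]? = some 'y' := by
          rcases hpre with ⟨r, hr⟩
          rw [← hr]; simp
        rw [List.getElem?_drop] at this
        rw [List.getElem?_eq_getElem (by omega)] at this
        simpa using this
      have hdecomp : t = t.take p ++ 'y' :: t.drop (p + 1) := by
        conv_lhs => rw [← List.take_append_drop p t]
        congr 1
        rw [List.drop_eq_getElem_cons hlt, hgetp]
      have hnoY : 'y' ∉ t.take p := by
        intro hmem
        rcases List.mem_take_iff_getElem.mp hmem with ⟨i, hi, hgi⟩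
        have hi' : i < p := by omega
        have := hspec.2 i hi'
        apply this
        rw [List.drop_eq_getElem_cons (by omega), hgi]
        exact ⟨_, rfl⟩
      have hslice : PySem.List.slice t (some (idx + 1)) none = t.drop (p + 1) := by
        rw [PySem.List.slice_from t (by omega : (0:Int) ≤ idx + 1)]
        congr 1
        omega
      rw [hslice]
      have hlen : (t.drop (p + 1)).length ≤ n := by
        simp only [List.length_drop]; omega
      rw [ih (t.drop (p + 1)) hlen (off + idx + 1) (k + 1) (total + |(off + idx) - 3 * k|)]
      -- now compute the RHS fold by decomposing t
      conv_rhs => rw [hdecomp]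
      rw [PySem.List.enumerate_append, List.foldl_append,
          foldA_noY (t.take p) hnoY off (0, 1 + 3 * k),
          PySem.List.enumerate_cons]
      simp only [List.foldl_cons, stepA, BEq.rfl, if_pos]
      have hlen_take : ((t.take p).length : Int) = (p : Int) := by
        simp [Nat.min_eq_left (le_of_lt hlt)]
      rw [hlen_take, hcast]
      simp only [zero_add]
      have habs : |off + idx + 1 - (1 + 3 * k)| = |off + idx - 3 * k| := by
        congr 1; ring
      have h3 : (1 : Int) + 3 * k + 3 = 1 + 3 * (k + 1) := by ring
      rw [habs, h3]
      have hadd := foldA_addFst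
        (PySem.List.enumerate (t.drop (p + 1)) (off + idx + 1))
        (|off + idx - 3 * k|) (1 + 3 * (k + 1))
      linarith [hadd]

-- ===== VERDICT (by name: the statement is the Claim_ definition above) =====
theorem check_yee_spec : Claim_equal_check_yee := by
  intro s _
  unfold Spec_check_yee check_yee check_yee_alt
  have h := loopA_enum
    (fun st i c => if c == 'y' then (st.1 + |(i + 1) - st.2|, st.2 + 3) else st)
    s.toList [] (0, 1)
  simp only [List.length_nil, List.nil_append, Nat.cast_zero, zero_add] at h
  rw [h]
  have h2 := goB_eq_foldA s.toList.length s.toList le_rfl 0 0 0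
  rw [h2, show (1:Int) + 3 * 0 = 1 from by norm_num, zero_add]
  rfl
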